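-- pv_equiv track=rewrite | github.com/noorkaraman/MSC_BA | ARP_final/code/ui_prototype.py | trim_to_char_budget
-- ===== SOURCE A (Python) =====
-- def trim_to_char_budget(text: str, max_chars: int = 60000) -> str:
--     """Trim text to fit within character budget"""
--     if len(text) <= max_chars:
--         return text
--     out, total = [], 0
--     for ln in text.splitlines():
--         L = len(ln) + 1
--         if total + L > max_chars:
--             break
--         out.append(ln)
--         total += L
--     out.append("\n...[trimmed due to context budget]...")
--     return "\n".join(out)
-- ===== SOURCE B (Python) =====
-- def trim_to_char_budget(text: str, max_chars: int = 60000) -> str: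
--     """Trim text to fit within character budget (prefix-sum table + binary search)."""
--     if len(text) <= max_chars:
--         return text
--     lines = text.splitlines()
--     prefix = []
--     acc = 0
--     for ln in lines:
--         acc += len(ln) + 1
--         prefix.append(acc)
--     lo, hi = 0, len(prefix)
--     while lo < hi:
--         mid = (lo + hi) // 2
--         if prefix[mid] <= max_chars:
--             lo = mid + 1
--         else:
--             hi = mid
--     return "\n".join(lines[:lo] + ["\n...[trimmed due to context budget]..."])
-- ===== Notes on version B (the rewrite author's own statement) =====
-- stated objective: alternative
-- what changed: A's single accumulate-and-break loop over the lines is replaced by building a prefix-sum table of cumulative line sizes and resolving the cut-off line count with a binary search over that table.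
import Mathlib
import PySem

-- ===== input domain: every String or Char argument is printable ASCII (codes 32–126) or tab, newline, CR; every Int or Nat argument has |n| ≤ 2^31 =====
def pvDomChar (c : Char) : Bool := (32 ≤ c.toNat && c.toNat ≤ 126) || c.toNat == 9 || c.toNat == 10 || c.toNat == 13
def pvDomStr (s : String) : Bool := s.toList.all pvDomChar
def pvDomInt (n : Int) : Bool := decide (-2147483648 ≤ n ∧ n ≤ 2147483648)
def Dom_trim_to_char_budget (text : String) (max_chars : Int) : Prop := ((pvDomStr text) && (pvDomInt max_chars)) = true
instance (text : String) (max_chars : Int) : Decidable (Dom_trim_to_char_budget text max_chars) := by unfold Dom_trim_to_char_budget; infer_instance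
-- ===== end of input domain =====

-- B replaces A's accumulate-and-break loop by a prefix-sum table resolved with a binary search (alternative decomposition, same cost).

-- ===== PORT A =====
-- A's for-loop with break, as the obvious structural recursion over the same state (running total)
def trimLoopA (lines : List String) (total : Int) (max_chars : Int) : List String :=
  match lines with
  | [] => []
  | ln :: rest =>
      let L := PySem.Str.len ln + 1
      if total + L > max_chars then []
      else ln :: trimLoopA rest (total + L) max_chars

def trim_to_char_budget (text : String) (max_chars : Int) : String :=
  if PySem.Str.len text ≤ max_chars then text
  else
    let out := trimLoopA (PySem.Str.splitlines text) 0 max_chars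
    PySem.Str.join "\n" (out ++ ["\n...[trimmed due to context budget]..."])

-- ===== PORT B =====
-- the prefix-table loop of Source B (acc += len(ln)+1; prefix.append(acc))
def trimPrefix (acc : Int) (lines : List String) : List Int :=
  match lines with
  | [] => []
  | ln :: rest =>
      let a := acc + (PySem.Str.len ln + 1)
      a :: trimPrefix a rest

-- the while-loop binary search of Source B; lo/hi are the nonnegative Python ints, so Nat with Nat division = Python's //
def trimBS (p : List Int) (max_chars : Int) (lo hi : Nat) : Nat :=
  if lo < hi then
    let mid := (lo + hi) / 2
    if PySem.List.pyGetD p (mid : Int) 0 ≤ max_chars then trimBS p max_chars (mid + 1) hi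
    else trimBS p max_chars lo mid
  else lo
termination_by hi - lo
decreasing_by all_goals omega

def trim_to_char_budget_alt (text : String) (max_chars : Int) : String :=
  if PySem.Str.len text ≤ max_chars then text
  else
    let lines := PySem.Str.splitlines text
    let pre := trimPrefix 0 lines
    let lo := trimBS pre max_chars 0 pre.length
    PySem.Str.join "\n" (PySem.List.slice lines none (some (lo : Int)) ++ ["\n...[trimmed due to context budget]..."])

-- ===== PRECONDITION & SPEC =====
def Spec_trim_to_char_budget (text : String) (max_chars : Int) (out : String) : Prop := out = trim_to_char_budget_alt text max_chars
instance (text : String) (max_chars : Int) (out : String) : Decidable (Spec_trim_to_char_budget text max_chars out) := by unfold Spec_trim_to_char_budget; infer_instance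

-- ===== CLAIM (what is proved, stated in full; the proofs are below) =====
def Claim_equal_trim_to_char_budget : Prop := ∀ (text : String) (max_chars : Int), Dom_trim_to_char_budget text max_chars → Spec_trim_to_char_budget text max_chars (trim_to_char_budget text max_chars)

-- ===== LEMMAS AND PROOFS =====

-- the number of lines A's loop keeps
def trimCount (lines : List String) (total : Int) (max_chars : Int) : Nat :=
  match lines with
  | [] => 0
  | ln :: rest =>
      let L := PySem.Str.len ln + 1
      if total + L > max_chars then 0
      else trimCount rest (total + L) max_chars + 1

theorem trimLoopA_eq_take (lines : List String) (total max_chars : Int) :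
    trimLoopA lines total max_chars = lines.take (trimCount lines total max_chars) := by
  induction lines generalizing total with
  | nil => simp [trimLoopA, trimCount]
  | cons ln rest ih =>
      simp only [trimLoopA, trimCount]
      split_ifs with h
      · simp
      · simp [ih, List.take_succ_cons]

theorem length_trimPrefix (acc : Int) (lines : List String) :
    (trimPrefix acc lines).length = lines.length := by
  induction lines generalizing acc with
  | nil => simp [trimPrefix]
  | cons ln rest ih => simp [trimPrefix, ih]

theorem le_trimPrefix_getD (acc : Int) (lines : List String) (i : Nat)
    (hi : i < lines.length) : acc < (trimPrefix acc lines).getD i 0 := by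
  induction lines generalizing acc i with
  | nil => simp at hi
  | cons ln rest ih =>
      cases i with
      | zero =>
          simp only [trimPrefix, List.getD_cons_zero]
          have hnn : (0:Int) ≤ PySem.Str.len ln := by simp [PySem.Str.len_eq]
          omega
      | succ j =>
          simp only [trimPrefix, List.getD_cons_succ]
          have hj : j < rest.length := by simpa using hi
          have h1 := ih (acc + (PySem.Str.len ln + 1)) j hj
          have hnn : (0:Int) ≤ PySem.Str.len ln := by simp [PySem.Str.len_eq]
          omega

theorem trimPrefix_mono (acc : Int) (lines : List String) (i j : Nat)
    (hij : i ≤ j) (hj : j < lines.length) :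
    (trimPrefix acc lines).getD i 0 ≤ (trimPrefix acc lines).getD j 0 := by
  induction lines generalizing acc i j with
  | nil => simp at hj
  | cons ln rest ih =>
      cases i with
      | zero =>
          cases j with
          | zero => exact le_refl _
          | succ j' =>
              simp only [trimPrefix, List.getD_cons_zero, List.getD_cons_succ]
              have hj' : j' < rest.length := by simpa using hj
              exact le_of_lt (le_trimPrefix_getD _ rest j' hj')
      | succ i' =>
          cases j with
          | zero => omega
          | succ j' =>
              simp only [trimPrefix, List.getD_cons_succ]
              exact ih _ i' j' (by omega) (by simpa using hj)

-- trimCount is the first index whose prefix sum exceeds the budget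
theorem trimCount_spec (lines : List String) (total max_chars : Int) :
    trimCount lines total max_chars ≤ lines.length ∧
    (∀ i < trimCount lines total max_chars, (trimPrefix total lines).getD i 0 ≤ max_chars) ∧
    (trimCount lines total max_chars < lines.length →
      max_chars < (trimPrefix total lines).getD (trimCount lines total max_chars) 0) := by
  induction lines generalizing total with
  | nil => simp [trimCount]
  | cons ln rest ih =>
      simp only [trimCount, trimPrefix]
      split_ifs with h
      · refine ⟨by omega, by intro i hi; exact absurd hi (by omega), ?_⟩
        intro _
        simp only [List.getD_cons_zero]; omega
      · obtain ⟨h1, h2, h3⟩ := ih (total + (PySem.Str.len ln + 1))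
        refine ⟨by simp only [List.length_cons]; omega, ?_, ?_⟩
        · intro i hi
          cases i with
          | zero => simp only [List.getD_cons_zero]; omega
          | succ i' =>
              simp only [List.getD_cons_succ]
              exact h2 i' (by omega)
        · intro hlt
          have hlt' : trimCount rest (total + (PySem.Str.len ln + 1)) max_chars < rest.length := by
            simp only [List.length_cons] at hlt; omega
          simpa [List.getD_cons_succ] using h3 hlt'

-- binary-search correctness: keeps the invariant and returns the split point
theorem trimBS_spec (p : List Int) (max_chars : Int)
    (hmono : ∀ i j, i ≤ j → j < p.length → p.getD i 0 ≤ p.getD j 0) :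
    ∀ lo hi, lo ≤ hi → hi ≤ p.length →
    (∀ i < lo, p.getD i 0 ≤ max_chars) →
    (∀ i, hi ≤ i → i < p.length → max_chars < p.getD i 0) →
    (∀ i < trimBS p max_chars lo hi, p.getD i 0 ≤ max_chars) ∧
    (trimBS p max_chars lo hi ≤ p.length) ∧
    (trimBS p max_chars lo hi < p.length → max_chars < p.getD (trimBS p max_chars lo hi) 0) := by
  intro lo hi
  induction hlh : hi - lo using Nat.strong_induction_on generalizing lo hi with
  | _ d ihd =>
  intro hle hhi hlow hhigh
  rw [trimBS]
  by_cases hlt : lo < hi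
  · simp only [hlt, if_true]
    have hmlt : (lo + hi) / 2 < hi := by omega
    have hmlo : lo ≤ (lo + hi) / 2 := by omega
    have hget : PySem.List.pyGetD p (((lo + hi) / 2 : Nat) : Int) 0 = p.getD ((lo + hi) / 2) 0 := by
      rw [PySem.List.pyGetD_natCast]
    by_cases hc : PySem.List.pyGetD p (((lo + hi) / 2 : Nat) : Int) 0 ≤ max_chars
    · simp only [hc, if_true]
      refine ihd (hi - ((lo + hi) / 2 + 1)) (by omega) ((lo + hi) / 2 + 1) hi rfl (by omega) hhi ?_ hhigh
      intro i hi'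
      rcases Nat.lt_succ_iff_lt_or_eq.mp hi' with h | h
      · calc p.getD i 0 ≤ p.getD ((lo + hi) / 2) 0 := hmono i _ (by omega) (by omega)
          _ ≤ max_chars := by rw [← hget]; exact hc
      · subst h; rw [← hget]; exact hc
    · simp only [hc, if_false]
      refine ihd ((lo + hi) / 2 - lo) (by omega) lo ((lo + hi) / 2) rfl (by omega) (by omega) hlow ?_
      intro i hi' hip
      calc max_chars < p.getD ((lo + hi) / 2) 0 := by rw [← hget]; omega
        _ ≤ p.getD i 0 := hmono _ i hi' hip
  · simp only [hlt, if_false]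
    have : lo = hi := by omega
    exact ⟨hlow, by omega, fun h => hhigh lo (by omega) h⟩

-- the two split points agree
theorem trimBS_eq_trimCount (lines : List String) (max_chars : Int) :
    trimBS (trimPrefix 0 lines) max_chars 0 (trimPrefix 0 lines).length
      = trimCount lines 0 max_chars := by
  have hlen : (trimPrefix 0 lines).length = lines.length := length_trimPrefix 0 lines
  have hmono : ∀ i j, i ≤ j → j < (trimPrefix 0 lines).length →
      (trimPrefix 0 lines).getD i 0 ≤ (trimPrefix 0 lines).getD j 0 := by
    intro i j hij hj
    exact trimPrefix_mono 0 lines i j hij (by omega)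
  obtain ⟨b1, b2, b3⟩ := trimBS_spec (trimPrefix 0 lines) max_chars hmono 0
    (trimPrefix 0 lines).length (by omega) le_rfl (by omega) (by omega)
  obtain ⟨c1, c2, c3⟩ := trimCount_spec lines 0 max_chars
  set r := trimBS (trimPrefix 0 lines) max_chars 0 (trimPrefix 0 lines).length with hr
  set k := trimCount lines 0 max_chars with hk
  rcases Nat.lt_trichotomy r k with h | h | h
  · have h1 := c2 r h
    have h2 := b3 (by omega)
    omega
  · exact h
  · have h1 := b1 k h
    have h2 := c3 (by omega)
    omega

-- ===== VERDICT (by name: the statement is the Claim_ definition above) =====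
theorem trim_to_char_budget_spec : Claim_equal_trim_to_char_budget := by
  intro text max_chars _
  unfold Spec_trim_to_char_budget trim_to_char_budget trim_to_char_budget_alt
  split_ifs with h
  · rfl
  · simp only [trimLoopA_eq_take, PySem.List.slice_to_natCast, trimBS_eq_trimCount]
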